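-- pv_equiv track=rewrite | github.com/SpaceKitKat/AI_Practice | bwg2KInARow.py | count_in_line
-- ===== SOURCE A (Python) =====
-- def count_in_line(list):
--   '''list of characters containing x's,o'x,spaces,or dashes. This function counts
--    either x's and o's contained in the list'''
--   ox_count=[0,0] # 0--> O, 1--> X
--   # count x's
--   if '-' in list or 'o' in list: #x is blocked
--     ox_count[1]=0
--   else:
--     for el in list:
--       if el.lower() == 'x': ox_count[1]+=1
--   # count o's
--   if '-' in list or 'x' in list: #o is blocked
--     ox_count[0]=0
--   else:
--     for el in list:
--       if el.lower() == 'o': ox_count[0]+=1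
--
--   return ox_count
-- ===== SOURCE B (Python) =====
-- def count_in_line(list):
--   has_dash = has_o = has_x = False
--   x_count = o_count = 0
--   for el in list:
--     if el == '-': has_dash = True
--     if el == 'o': has_o = True
--     if el == 'x': has_x = True
--     low = el.lower()
--     if low == 'x': x_count += 1
--     if low == 'o': o_count += 1
--   return [0 if (has_dash or has_x) else o_count,
--           0 if (has_dash or has_o) else x_count]
-- ===== Notes on version B (the rewrite author's own statement) =====
-- stated objective: alternative
-- what changed: A does two case-sensitive membership scans plus two separate counting loops; B makes one pass collecting three blocking flags and both case-insensitive counters, then decides each slot after the loop.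
import Mathlib
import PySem

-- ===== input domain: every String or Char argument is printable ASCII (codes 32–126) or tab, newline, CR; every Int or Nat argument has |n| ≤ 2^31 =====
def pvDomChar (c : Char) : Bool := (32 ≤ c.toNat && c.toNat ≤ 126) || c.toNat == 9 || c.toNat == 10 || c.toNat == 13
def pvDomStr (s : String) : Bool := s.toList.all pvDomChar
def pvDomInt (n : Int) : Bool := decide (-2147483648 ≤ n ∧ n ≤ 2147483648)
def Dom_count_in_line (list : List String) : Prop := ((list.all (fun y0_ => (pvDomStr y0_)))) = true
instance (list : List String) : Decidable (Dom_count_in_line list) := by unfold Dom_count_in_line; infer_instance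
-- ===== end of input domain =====

-- B replaces A's two membership scans and two counting loops with one pass collecting flags and counters (alternative decomposition, same cost).


-- ===== PORT A =====
-- A: membership tests are case-sensitive (Python 'in'); counting compares el.lower().
def count_in_line (list : List String) : List Int :=
  let x : Int := if list.contains "-" || list.contains "o" then 0
    else list.foldl (fun acc el => if PySem.Str.lower el = "x" then acc + 1 else acc) 0
  let o : Int := if list.contains "-" || list.contains "x" then 0
    else list.foldl (fun acc el => if PySem.Str.lower el = "o" then acc + 1 else acc) 0
  [o, x]

-- ===== PORT B =====
-- B: one fold over the list carrying (has_dash, has_o, has_x, x_count, o_count).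
def pvStepB (st : Bool × Bool × Bool × Int × Int) (el : String) : Bool × Bool × Bool × Int × Int :=
  let d := st.1 || el == "-"
  let o := st.2.1 || el == "o"
  let x := st.2.2.1 || el == "x"
  let low := PySem.Str.lower el
  let xc := if low = "x" then st.2.2.2.1 + 1 else st.2.2.2.1
  let oc := if low = "o" then st.2.2.2.2 + 1 else st.2.2.2.2
  (d, o, x, xc, oc)

def count_in_line_alt (list : List String) : List Int :=
  let st := list.foldl pvStepB (false, false, false, 0, 0)
  [if st.1 || st.2.2.1 then 0 else st.2.2.2.2,
   if st.1 || st.2.1 then 0 else st.2.2.2.1]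

-- ===== PRECONDITION & SPEC =====
def Spec_count_in_line (list : List String) (out : List Int) : Prop := out = count_in_line_alt list
instance (list : List String) (out : List Int) : Decidable (Spec_count_in_line list out) := by unfold Spec_count_in_line; infer_instance

-- ===== CLAIM (what is proved, stated in full; the proofs are below) =====
def Claim_equal_count_in_line : Prop := ∀ (list : List String), Dom_count_in_line list → Spec_count_in_line list (count_in_line list)

-- ===== LEMMAS AND PROOFS =====
theorem pvFoldB_char (l : List String) :
    ∀ (d o x : Bool) (xc oc : Int),
    l.foldl pvStepB (d, o, x, xc, oc) =
      (d || l.contains "-", o || l.contains "o", x || l.contains "x",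
       l.foldl (fun acc el => if PySem.Str.lower el = "x" then acc + 1 else acc) xc,
       l.foldl (fun acc el => if PySem.Str.lower el = "o" then acc + 1 else acc) oc) := by
  induction l with
  | nil => intro d o x xc oc; simp
  | cons hd tl ih =>
    intro d o x xc oc
    simp only [List.foldl_cons, pvStepB, ih, List.contains_cons, Bool.or_assoc]
    rw [show (hd == "-") = ("-" == hd) from by rw [Bool.beq_comm],
        show (hd == "o") = ("o" == hd) from by rw [Bool.beq_comm],
        show (hd == "x") = ("x" == hd) from by rw [Bool.beq_comm]]

-- ===== VERDICT (by name: the statement is the Claim_ definition above) =====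
theorem count_in_line_spec : Claim_equal_count_in_line := by
  intro list _
  unfold Spec_count_in_line count_in_line count_in_line_alt
  rw [pvFoldB_char]
  simp
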